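-- pv_equiv track=rewrite | github.com/grucla/verifinsta | verifier.py | get_predicates_of_strips_goal
-- ===== SOURCE A (Python) =====
-- def get_predicates_of_strips_goal(goal):
--     predicate_symbols_in_goal = set(atom[0] for atom in goal[1:])
--     covered_predicate_symbols = set()
--     goal_predicates = []
--     for atom in goal[1:]:
--         if atom[0] in covered_predicate_symbols:
--             continue
--         covered_predicate_symbols.add(atom[0])
--         goal_pred = [atom[0]]
--         for i in range(1,len(atom)):
--             goal_pred.append(f"?x{i}")
--         goal_predicates.append(goal_pred)
--     return goal_predicates
-- ===== SOURCE B (Python) =====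
-- def get_predicates_of_strips_goal(goal):
--     def build(atoms):
--         if not atoms:
--             return []
--         first, rest = atoms[0], atoms[1:]
--         template = [first[0]] + [f"?x{i}" for i in range(1, len(first))]
--         return [template] + build([a for a in rest if a[0] != first[0]])
--     return build(goal[1:])
-- ===== Notes on version B (the rewrite author's own statement) =====
-- stated objective: alternative
-- what changed: Replaces A's single-pass loop with a mutable seen-set by a recursive divide step with no auxiliary set at all: take the first atom, emit its template, filter every later atom with the same predicate symbol out of the rest, and recurse on what remains.
import Mathlib
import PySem

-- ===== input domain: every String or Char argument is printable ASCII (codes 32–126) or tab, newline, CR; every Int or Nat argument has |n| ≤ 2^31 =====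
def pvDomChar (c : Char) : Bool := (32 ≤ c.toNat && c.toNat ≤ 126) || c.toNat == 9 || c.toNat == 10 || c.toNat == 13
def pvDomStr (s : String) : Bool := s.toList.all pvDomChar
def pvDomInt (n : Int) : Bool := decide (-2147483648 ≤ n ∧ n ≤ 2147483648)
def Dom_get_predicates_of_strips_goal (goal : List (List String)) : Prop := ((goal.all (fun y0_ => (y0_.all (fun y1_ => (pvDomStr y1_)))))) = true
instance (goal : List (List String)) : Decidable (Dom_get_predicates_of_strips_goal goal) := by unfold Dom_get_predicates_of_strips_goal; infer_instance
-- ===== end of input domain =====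

-- B replaces A's seen-set loop by a recursive take-first / filter-out-same-symbol / recurse decomposition with no auxiliary set; objective: alternative.


-- ===== PORT A =====
-- one step of A's main loop: skip covered symbols, else record the symbol and build the template by the inner range loop
def pvStepA (st : PySem.Set String × List (List String)) (atom : List String) :
    PySem.Set String × List (List String) :=
  let h := PySem.List.pyGetD atom 0 ""   -- atom[0]; Pre_ guarantees atom ≠ []
  if st.1.contains h then st
  else (st.1.add h,
        st.2 ++ [(PySem.List.pyRange 1 (atom.length : Int) 1).foldl
                   (fun pred i => pred ++ ["?x" ++ PySem.Int.toStr i]) [h]])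

def get_predicates_of_strips_goal (goal : List (List String)) : List (List String) :=
  let tail := PySem.List.slice goal (some 1) none                 -- goal[1:]
  let _predicate_symbols_in_goal : PySem.Set String :=            -- computed by A, never used
    PySem.Set.ofList (tail.map (fun atom => PySem.List.pyGetD atom 0 ""))
  (tail.foldl pvStepA (PySem.Set.empty, [])).2

-- ===== PORT B =====
-- build(atoms): first atom's template, then recurse on the rest with same-symbol atoms filtered out
def pvBuild : List (List String) → List (List String)
  | [] => []
  | first :: rest =>
    let sym := PySem.List.pyGetD first 0 ""
    (sym :: (PySem.List.pyRange 1 (first.length : Int) 1).map (fun i => "?x" ++ PySem.Int.toStr i))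
      :: pvBuild (rest.filter (fun a => PySem.List.pyGetD a 0 "" != sym))
termination_by atoms => atoms.length
decreasing_by simpa using Nat.lt_succ_of_le (List.length_filter_le _ _)

def get_predicates_of_strips_goal_alt (goal : List (List String)) : List (List String) :=
  pvBuild (PySem.List.slice goal (some 1) none)

-- ===== PRECONDITION & SPEC =====
-- Pre_ excludes exactly the goals whose tail contains an empty atom: there Python A (and B) raise IndexError on atom[0].
def Pre_get_predicates_of_strips_goal (goal : List (List String)) : Prop :=
  ∀ atom ∈ goal.drop 1, atom ≠ []
instance (goal : List (List String)) : Decidable (Pre_get_predicates_of_strips_goal goal) := by unfold Pre_get_predicates_of_strips_goal; infer_instance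

def pvWitness_get_predicates_of_strips_goal : List (List String) :=
  [["and"], ["p", "a", "b"], ["p", "c", "d"], ["q", "e"]]

def Spec_get_predicates_of_strips_goal (goal : List (List String)) (out : List (List String)) : Prop := out = get_predicates_of_strips_goal_alt goal
instance (goal : List (List String)) (out : List (List String)) : Decidable (Spec_get_predicates_of_strips_goal goal out) := by unfold Spec_get_predicates_of_strips_goal; infer_instance

-- ===== CLAIM (what is proved, stated in full; the proofs are below) =====
def Claim_equal_get_predicates_of_strips_goal : Prop := ∀ (goal : List (List String)), Dom_get_predicates_of_strips_goal goal → Pre_get_predicates_of_strips_goal goal → Spec_get_predicates_of_strips_goal goal (get_predicates_of_strips_goal goal)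

-- ===== LEMMAS AND PROOFS =====

-- unfolding equation for the well-founded recursion pvBuild on a cons
theorem pvBuild_cons (first : List String) (rest : List (List String)) :
    pvBuild (first :: rest)
      = (PySem.List.pyGetD first 0 ""
           :: (PySem.List.pyRange 1 (first.length : Int) 1).map (fun i => "?x" ++ PySem.Int.toStr i))
        :: pvBuild (rest.filter (fun a => PySem.List.pyGetD a 0 "" != PySem.List.pyGetD first 0 "")) := by
  rw [pvBuild]

-- the inner range loop of A builds exactly B's mapped template
theorem pvFlatten_map_singleton {α β : Type} (l : List α) (f : α → β) :
    (l.map fun x => [f x]).flatten = l.map f := by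
  induction l with
  | nil => rfl
  | cons x xs ih => simp [ih]

-- main invariant: A's fold over the remaining atoms, with covered set cov, appends to acc
-- exactly B's recursion on the atoms whose symbol is not yet covered
theorem pvLoop_eq (tail : List (List String)) :
    ∀ (cov : PySem.Set String) (acc : List (List String)),
    (tail.foldl pvStepA (cov, acc)).2
      = acc ++ pvBuild (tail.filter (fun a => !cov.contains (PySem.List.pyGetD a 0 ""))) := by
  induction tail with
  | nil => intro cov acc; simp [pvBuild]
  | cons atom rest ih =>
    intro cov acc
    simp only [List.foldl_cons, List.filter_cons]
    by_cases hc : PySem.List.pyGetD atom 0 "" ∈ cov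
    · have hcb : List.contains cov (PySem.List.pyGetD atom 0 "") = true := by simpa using hc
      rw [show pvStepA (cov, acc) atom = (cov, acc) by
        simp [pvStepA, PySem.Set.contains, hc]]
      simp only [PySem.Set.contains, hcb, Bool.not_true, Bool.false_eq_true, if_false]
      exact ih cov acc
    · rw [show pvStepA (cov, acc) atom
            = (cov.add (PySem.List.pyGetD atom 0 ""),
               acc ++ [(PySem.List.pyRange 1 (atom.length : Int) 1).foldl
                         (fun pred i => pred ++ ["?x" ++ PySem.Int.toStr i])
                         [PySem.List.pyGetD atom 0 ""]]) by
        simp [pvStepA, PySem.Set.contains, hc]]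
      rw [ih]
      have hfilt : rest.filter
            (fun a => !List.contains (cov.add (PySem.List.pyGetD atom 0 "")) (PySem.List.pyGetD a 0 ""))
          = (rest.filter (fun a => !List.contains cov (PySem.List.pyGetD a 0 ""))).filter
              (fun a => PySem.List.pyGetD a 0 "" != PySem.List.pyGetD atom 0 "") := by
        rw [List.filter_filter]
        apply List.filter_congr
        intro a _
        by_cases he : PySem.List.pyGetD a 0 "" = PySem.List.pyGetD atom 0 ""
        · simp [PySem.Set.add, PySem.Set.contains, hc, he]
        · simp [PySem.Set.add, PySem.Set.contains, hc, he]
      have hcb : List.contains cov (PySem.List.pyGetD atom 0 "") = false := by simpa using hc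
      simp only [PySem.Set.contains, hcb, Bool.not_false, if_true]
      rw [pvBuild_cons, ← hfilt]
      simp [pvFlatten_map_singleton]

-- ===== VERDICT (by name: the statement is the Claim_ definition above) =====
theorem get_predicates_of_strips_goal_spec : Claim_equal_get_predicates_of_strips_goal := by
  intro goal _ _
  unfold Spec_get_predicates_of_strips_goal get_predicates_of_strips_goal get_predicates_of_strips_goal_alt
  rw [pvLoop_eq]
  simp [PySem.Set.empty, PySem.Set.contains]
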